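-- pv_equiv track=rewrite | github.com/mart-mihkel/icftner | src/cptlms/datasets/squad.py | _find_label_span
-- ===== SOURCE A (Python) =====
-- def _find_label_span(
--     offset: list[tuple[int, int]],
--     sequence_ids: list[int | None],
--     start_char: int,
--     end_char: int,
-- ) -> tuple[int, int]:
--     idx = 0
--     while sequence_ids[idx] != 1:
--         idx += 1
--     context_start = idx
--     while sequence_ids[idx] == 1:
--         idx += 1
--     context_end = idx - 1
--
--     if offset[context_start][0] > end_char or offset[context_end][1] < start_char:
--         return 0, 0
--
--     idx = context_start
--     while idx <= context_end and offset[idx][0] <= start_char: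
--         idx += 1
--
--     start = idx - 1
--
--     idx = context_end
--     while idx >= context_start and offset[idx][1] >= end_char:
--         idx -= 1
--
--     end = idx + 1
--
--     return start, end
-- ===== SOURCE B (Python) =====
-- def _find_label_span(
--     offset: list[tuple[int, int]],
--     sequence_ids: list[int | None],
--     start_char: int,
--     end_char: int,
-- ) -> tuple[int, int]:
--     # One fused forward pass over the context range instead of A's two
--     # directional boundary scans (the end boundary is found going up, not down).
--     context_start = None
--     context_end = None
--     for i, sid in enumerate(sequence_ids):
--         if sid == 1:
--             if context_start is None:
--                 context_start = i
--             context_end = i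
--         elif context_start is not None:
--             break
--
--     if offset[context_start][0] > end_char or offset[context_end][1] < start_char:
--         return 0, 0
--
--     first_gt = context_end + 1
--     last_lt = context_start - 1
--     for i in range(context_start, context_end + 1):
--         s, e = offset[i]
--         if first_gt > context_end and s > start_char:
--             first_gt = i
--         if e < end_char:
--             last_lt = i
--
--     return first_gt - 1, last_lt + 1
-- ===== Notes on version B (the rewrite author's own statement) =====
-- stated objective: alternative
-- what changed: B finds the context run in one enumerate pass with break and then computes both span boundaries in a single fused forward pass over the context range (first start-offset exceeding start_char, last end-offset below end_char), replacing A's two separate directional while-scans (the end boundary scanned downward).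
-- crash fix: When the first run of 1s in sequence_ids extends to the very end of the list, A raises IndexError in its second while loop; B's enumerate loop simply ends and B returns the token span normally (whenever the offset entries it reads exist). — e.g. on _find_label_span([(0, 5)], [some 1], 0, 1): A raises IndexError, B returns (0, 0)
import Mathlib
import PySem

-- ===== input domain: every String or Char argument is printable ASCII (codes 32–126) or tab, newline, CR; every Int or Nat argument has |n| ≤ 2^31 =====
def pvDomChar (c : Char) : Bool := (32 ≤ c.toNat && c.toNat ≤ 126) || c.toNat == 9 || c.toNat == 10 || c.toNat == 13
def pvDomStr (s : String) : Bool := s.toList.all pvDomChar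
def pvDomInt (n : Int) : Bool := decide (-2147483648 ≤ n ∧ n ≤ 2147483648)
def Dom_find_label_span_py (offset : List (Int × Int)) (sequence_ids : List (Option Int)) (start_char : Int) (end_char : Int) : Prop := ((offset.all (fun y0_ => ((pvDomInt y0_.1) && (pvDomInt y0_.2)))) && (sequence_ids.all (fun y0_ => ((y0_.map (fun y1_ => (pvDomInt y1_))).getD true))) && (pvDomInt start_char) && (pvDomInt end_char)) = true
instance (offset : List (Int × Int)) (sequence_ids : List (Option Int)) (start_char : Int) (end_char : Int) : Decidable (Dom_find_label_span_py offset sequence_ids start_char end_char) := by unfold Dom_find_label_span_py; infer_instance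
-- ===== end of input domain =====

-- B replaces A's two directional boundary scans by one fused forward pass over the
-- context range (objective: alternative decomposition, same asymptotic cost).

-- Python list indexing with an in-range non-negative index; on the inputs admitted by
-- Pre_ every index used is in range (out of range Python raises and Pre_ excludes it).
def pvOg (offset : List (Int × Int)) (i : Nat) : Int × Int := offset.getD i (0, 0)

-- ===== PORT A =====
-- while sequence_ids[idx] != 1: idx += 1   (falling off the end is a Python IndexError; excluded by Pre_)
def aFind1 (sids : List (Option Int)) (idx : Nat) : Nat :=
  if h : idx < sids.length then
    if sids[idx] ≠ some 1 then aFind1 sids (idx + 1) else idx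
  else idx
termination_by sids.length - idx

-- while sequence_ids[idx] == 1: idx += 1   (falling off the end is a Python IndexError; excluded by Pre_)
def aFindEnd (sids : List (Option Int)) (idx : Nat) : Nat :=
  if h : idx < sids.length then
    if sids[idx] = some 1 then aFindEnd sids (idx + 1) else idx
  else idx
termination_by sids.length - idx

-- while idx <= context_end and offset[idx][0] <= start_char: idx += 1
def aLoop3 (offset : List (Int × Int)) (ce : Nat) (start_char : Int) (idx : Nat) : Nat :=
  if idx ≤ ce ∧ (pvOg offset idx).1 ≤ start_char then aLoop3 offset ce start_char (idx + 1) else idx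
termination_by ce + 1 - idx

-- while idx >= context_start and offset[idx][1] >= end_char: idx -= 1
def aLoop4 (offset : List (Int × Int)) (cs : Int) (end_char : Int) (idx : Int) : Int :=
  if cs ≤ idx ∧ end_char ≤ (pvOg offset idx.toNat).2 then aLoop4 offset cs end_char (idx - 1) else idx
termination_by (idx + 1 - cs).toNat
decreasing_by omega

def find_label_span_py (offset : List (Int × Int)) (sequence_ids : List (Option Int)) (start_char : Int) (end_char : Int) : Int × Int :=
  let context_start := aFind1 sequence_ids 0
  let context_end := aFindEnd sequence_ids context_start - 1
  if (pvOg offset context_start).1 > end_char ∨ (pvOg offset context_end).2 < start_char then (0, 0)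
  else
    let start : Int := (aLoop3 offset context_end start_char context_start : Int) - 1
    let e : Int := aLoop4 offset (context_start : Int) end_char (context_end : Int) + 1
    (start, e)

-- ===== PORT B =====
-- the single enumerate pass with break that finds the first run of 1s
def bCtx (sids : List (Option Int)) (i : Nat) (cs ce : Option Nat) : Option Nat × Option Nat :=
  match sids with
  | [] => (cs, ce)
  | sid :: rest =>
    if sid = some 1 then bCtx rest (i + 1) (if cs.isNone then some i else cs) (some i)
    else if cs.isSome then (cs, ce)
    else bCtx rest (i + 1) cs ce

-- body of B's fused boundary loop: update (first_gt, last_lt) at index i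
def bStep (offset : List (Int × Int)) (ce : Nat) (start_char end_char : Int) (p : Int × Int) (i : Nat) : Int × Int :=
  let se := pvOg offset i
  ((if p.1 > (ce : Int) ∧ se.1 > start_char then (i : Int) else p.1),
   (if se.2 < end_char then (i : Int) else p.2))

def find_label_span_py_alt (offset : List (Int × Int)) (sequence_ids : List (Option Int)) (start_char : Int) (end_char : Int) : Int × Int :=
  match bCtx sequence_ids 0 none none with
  | (some context_start, some context_end) =>
    if (pvOg offset context_start).1 > end_char ∨ (pvOg offset context_end).2 < start_char then (0, 0)
    else
      let p := (List.range' context_start (context_end + 1 - context_start)).foldl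
                 (bStep offset context_end start_char end_char)
                 ((context_end : Int) + 1, (context_start : Int) - 1)
      (p.1 - 1, p.2 + 1)
  | _ => (0, 0)  -- context_start is None: Python B raises TypeError here; excluded by Pre_

-- ===== PRECONDITION & SPEC =====
-- index of the first 1 in sequence_ids (= length if none)
def pvCs (sids : List (Option Int)) : Nat := sids.findIdx (fun x => x == some 1)
-- length of the first run of 1s
def pvK (sids : List (Option Int)) : Nat := (sids.drop (pvCs sids)).findIdx (fun x => !(x == some 1))

-- Exactly the inputs on which Python A returns: a 1 exists, its run ends before the list does
-- (else the second while raises IndexError), and every offset entry A actually indexes is in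
-- range (context_start always; context_end only when the guard's first disjunct is false).
def Pre_find_label_span_py (offset : List (Int × Int)) (sequence_ids : List (Option Int)) (start_char : Int) (end_char : Int) : Prop :=
  pvCs sequence_ids < sequence_ids.length ∧
  pvCs sequence_ids + pvK sequence_ids < sequence_ids.length ∧
  pvCs sequence_ids < offset.length ∧
  ((offset.getD (pvCs sequence_ids) (0, 0)).1 > end_char ∨
    pvCs sequence_ids + pvK sequence_ids - 1 < offset.length)

instance (offset : List (Int × Int)) (sequence_ids : List (Option Int)) (start_char : Int) (end_char : Int) : Decidable (Pre_find_label_span_py offset sequence_ids start_char end_char) := by unfold Pre_find_label_span_py; infer_instance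

def pvWitness_find_label_span_py : (List (Int × Int)) × List (Option Int) × Int × Int :=
  ([(0, 5)], [some 1, some 0], 1, 3)

-- On inputs whose first run of 1s reaches the very end of sequence_ids, A raises IndexError in
-- its second while loop, while B (whose enumerate loop just ends) returns the span normally
-- whenever the offset entries it reads are in range.
def Raises_find_label_span_py (offset : List (Int × Int)) (sequence_ids : List (Option Int)) (start_char : Int) (end_char : Int) : Prop :=
  pvCs sequence_ids < sequence_ids.length ∧
  pvCs sequence_ids + pvK sequence_ids = sequence_ids.length ∧
  pvCs sequence_ids < offset.length ∧
  (sequence_ids.length ≤ offset.length ∨ (offset.getD (pvCs sequence_ids) (0, 0)).1 > end_char)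

instance (offset : List (Int × Int)) (sequence_ids : List (Option Int)) (start_char : Int) (end_char : Int) : Decidable (Raises_find_label_span_py offset sequence_ids start_char end_char) := by unfold Raises_find_label_span_py; infer_instance

def pvRaiseWitness_find_label_span_py : (List (Int × Int)) × List (Option Int) × Int × Int :=
  ([(0, 5)], [some 1], 0, 1)

def pvRaiseWitnessOut_find_label_span_py : Int × Int := (0, 0)

def Spec_find_label_span_py (offset : List (Int × Int)) (sequence_ids : List (Option Int)) (start_char : Int) (end_char : Int) (out : Int × Int) : Prop := out = find_label_span_py_alt offset sequence_ids start_char end_char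
instance (offset : List (Int × Int)) (sequence_ids : List (Option Int)) (start_char : Int) (end_char : Int) (out : Int × Int) : Decidable (Spec_find_label_span_py offset sequence_ids start_char end_char out) := by unfold Spec_find_label_span_py; infer_instance

-- ===== CLAIM (what is proved, stated in full; the proofs are below) =====
def Claim_equal_find_label_span_py : Prop := ∀ (offset : List (Int × Int)) (sequence_ids : List (Option Int)) (start_char : Int) (end_char : Int), Dom_find_label_span_py offset sequence_ids start_char end_char → Pre_find_label_span_py offset sequence_ids start_char end_char → Spec_find_label_span_py offset sequence_ids start_char end_char (find_label_span_py offset sequence_ids start_char end_char)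

def Claim_raises_find_label_span_py : Prop := (∀ (offset : List (Int × Int)) (sequence_ids : List (Option Int)) (start_char : Int) (end_char : Int), Dom_find_label_span_py offset sequence_ids start_char end_char → Raises_find_label_span_py offset sequence_ids start_char end_char → ¬ Pre_find_label_span_py offset sequence_ids start_char end_char) ∧ (Dom_find_label_span_py (pvRaiseWitness_find_label_span_py.1) (pvRaiseWitness_find_label_span_py.2.1) (pvRaiseWitness_find_label_span_py.2.2.1) (pvRaiseWitness_find_label_span_py.2.2.2) ∧ Raises_find_label_span_py (pvRaiseWitness_find_label_span_py.1) (pvRaiseWitness_find_label_span_py.2.1) (pvRaiseWitness_find_label_span_py.2.2.1) (pvRaiseWitness_find_label_span_py.2.2.2) ∧ find_label_span_py_alt (pvRaiseWitness_find_label_span_py.1) (pvRaiseWitness_find_label_span_py.2.1) (pvRaiseWitness_find_label_span_py.2.2.1) (pvRaiseWitness_find_label_span_py.2.2.2) = pvRaiseWitnessOut_find_label_span_py)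

-- ===== LEMMAS AND PROOFS =====

theorem aFind1_eq (sids : List (Option Int)) (idx : Nat) :
    aFind1 sids idx = idx + (sids.drop idx).findIdx (fun x => x == some 1) := by
  fun_induction aFind1 sids idx with
  | case1 i h h2 ih =>
      have h3 : ((sids[i] == some 1) : Bool) = false := by simp [h2]
      simp only [List.drop_eq_getElem_cons h, List.findIdx_cons, ih, h3]
      simp; omega
  | case2 i h h2 =>
      have h3 : sids[i] = some 1 := not_not.mp h2
      simp [List.drop_eq_getElem_cons h, List.findIdx_cons, h3]
  | case3 i h =>
      rw [List.drop_of_length_le (by omega)]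
      simp

theorem aFindEnd_eq (sids : List (Option Int)) (idx : Nat) :
    aFindEnd sids idx = idx + (sids.drop idx).findIdx (fun x => !(x == some 1)) := by
  fun_induction aFindEnd sids idx with
  | case1 i h h2 ih =>
      simp only [List.drop_eq_getElem_cons h, List.findIdx_cons, ih]
      simp [h2]; omega
  | case2 i h h2 =>
      have h3 : ((sids[i] == some 1) : Bool) = false := by simp [h2]
      simp only [List.drop_eq_getElem_cons h, List.findIdx_cons, h3]
      simp
  | case3 i h =>
      rw [List.drop_of_length_le (by omega)]
      simp

theorem bCtx_run (l : List (Option Int)) : ∀ (i c e : Nat), e + 1 = i →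
    bCtx l i (some c) (some e) = (some c, some (i + l.findIdx (fun x => !(x == some 1)) - 1)) := by
  induction l with
  | nil => intro i c e he; simp [bCtx]; omega
  | cons a rest ih =>
      intro i c e he
      by_cases ha : a = some 1
      · subst ha
        rw [bCtx, if_pos rfl]
        simp only [Option.isNone_some, Bool.false_eq_true, if_false]
        rw [ih (i+1) c i rfl]
        simp [List.findIdx_cons]
      · have ha' : ((a == some 1) : Bool) = false := by simp [ha]
        rw [bCtx, if_neg ha]
        simp [List.findIdx_cons, ha']
        omega

theorem bCtx_found (l : List (Option Int)) : ∀ (i : Nat),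
    some 1 ∈ l →
    bCtx l i none none =
      (some (i + l.findIdx (fun x => x == some 1)),
       some (i + l.findIdx (fun x => x == some 1) +
         (l.drop (l.findIdx (fun x => x == some 1))).findIdx (fun x => !(x == some 1)) - 1)) := by
  induction l with
  | nil => intro i h; simp at h
  | cons a rest ih =>
      intro i h
      by_cases ha : a = some 1
      · subst ha
        rw [bCtx, if_pos rfl]
        simp only [Option.isNone_none, if_true]
        rw [bCtx_run rest (i+1) i i rfl]
        simp [List.findIdx_cons]
      · have ha' : ((a == some 1) : Bool) = false := by simp [ha]
        have hm : some 1 ∈ rest := by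
          rcases List.mem_cons.mp h with h' | h'
          · exact absurd h'.symm ha
          · exact h'
        rw [bCtx, if_neg ha]
        simp only [Option.isSome_none, Bool.false_eq_true, if_false]
        rw [ih (i+1) hm]
        simp [List.findIdx_cons, ha', List.drop_succ_cons]
        omega

theorem foldl_bStep_split (offset : List (Int × Int)) (ce : Nat) (sc ec : Int)
    (l : List Nat) : ∀ (p : Int × Int),
    l.foldl (bStep offset ce sc ec) p =
      (l.foldl (fun a i => if a > (ce : Int) ∧ (pvOg offset i).1 > sc then (i : Int) else a) p.1,
       l.foldl (fun a i => if (pvOg offset i).2 < ec then (i : Int) else a) p.2) := by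
  induction l with
  | nil => intro p; simp
  | cons x rest ih => intro p; simp only [List.foldl_cons, ih]; rfl

theorem g1_const (offset : List (Int × Int)) (ce : Nat) (sc : Int) (l : List Nat) :
    ∀ (a : Int), a ≤ (ce : Int) →
    l.foldl (fun a i => if a > (ce : Int) ∧ (pvOg offset i).1 > sc then (i : Int) else a) a = a := by
  induction l with
  | nil => intro a ha; simp
  | cons x rest ih =>
      intro a ha
      simp only [List.foldl_cons]
      rw [if_neg (fun hc => absurd hc.1 (not_lt.mpr ha)), ih a ha]

theorem aLoop3_eq (offset : List (Int × Int)) (ce : Nat) (sc : Int) :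
    ∀ (n idx : Nat), idx + n = ce + 1 →
    (aLoop3 offset ce sc idx : Int) = (List.range' idx n).foldl
      (fun a i => if a > (ce : Int) ∧ (pvOg offset i).1 > sc then (i : Int) else a) ((ce : Int) + 1) := by
  intro n
  induction n with
  | zero =>
      intro idx h
      rw [aLoop3, if_neg (by omega)]
      simp; omega
  | succ m ih =>
      intro idx h
      have hidx : idx ≤ ce := by omega
      rw [List.range'_succ, List.foldl_cons]
      by_cases hp : (pvOg offset idx).1 ≤ sc
      · rw [aLoop3, if_pos ⟨hidx, hp⟩, ih (idx+1) (by omega)]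
        congr 1
        rw [if_neg (fun hc => absurd hc.2 (not_lt.mpr hp))]
      · rw [aLoop3, if_neg (fun hc => hp hc.2)]
        rw [if_pos ⟨by omega, not_le.mp hp⟩]
        rw [g1_const offset ce sc _ (idx : Int) (by omega)]

theorem aLoop4_eq (offset : List (Int × Int)) (cs : Nat) (ec : Int) :
    ∀ (n : Nat) (idx : Int), idx = (cs : Int) - 1 + n →
    aLoop4 offset (cs : Int) ec idx = (List.range' cs n).foldl
      (fun a i => if (pvOg offset i).2 < ec then (i : Int) else a) ((cs : Int) - 1) := by
  intro n
  induction n with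
  | zero =>
      intro idx h
      rw [aLoop4, if_neg (by omega)]
      simp; omega
  | succ m ih =>
      intro idx h
      have hrange : List.range' cs (m + 1) = List.range' cs m ++ [cs + m] := by
        have := List.range'_concat (s := cs) (n := m) (step := 1)
        simpa using this
      rw [hrange, List.foldl_append, List.foldl_cons, List.foldl_nil]
      have htn : idx.toNat = cs + m := by omega
      by_cases hp : (pvOg offset (cs + m)).2 < ec
      · rw [if_pos hp]
        rw [aLoop4, if_neg (fun hc => absurd (htn ▸ hc.2) (not_le.mpr hp))]
        omega
      · rw [if_neg hp]
        rw [aLoop4, if_pos ⟨by omega, by rw [htn]; omega⟩]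
        rw [ih (idx - 1) (by omega)]

theorem find_label_span_main (offset : List (Int × Int)) (sequence_ids : List (Option Int))
    (start_char end_char : Int) (h1 : pvCs sequence_ids < sequence_ids.length) :
    find_label_span_py offset sequence_ids start_char end_char =
      find_label_span_py_alt offset sequence_ids start_char end_char := by
  have hA1 : aFind1 sequence_ids 0 = pvCs sequence_ids := by
    rw [aFind1_eq]; simp [pvCs]
  have hA2 : aFindEnd sequence_ids (pvCs sequence_ids) = pvCs sequence_ids + pvK sequence_ids := by
    rw [aFindEnd_eq]; simp [pvK]
  have hB : bCtx sequence_ids 0 none none =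
      (some (pvCs sequence_ids), some (pvCs sequence_ids + pvK sequence_ids - 1)) := by
    have hmem : some 1 ∈ sequence_ids := by
      have := List.findIdx_lt_length.mp h1
      simpa using this
    rw [bCtx_found sequence_ids 0 hmem]
    simp [pvCs, pvK]
  set cs := pvCs sequence_ids with hcs
  set ce := cs + pvK sequence_ids - 1 with hce
  have hk1 : 1 ≤ pvK sequence_ids := by
    have hget : sequence_ids[cs]'h1 = some 1 := by
      have := List.findIdx_getElem (p := fun x => x == some 1) (xs := sequence_ids) (w := h1)
      simpa using this
    have hdrop : sequence_ids.drop cs = some 1 :: sequence_ids.drop (cs + 1) := by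
      rw [List.drop_eq_getElem_cons h1, hget]
    simp [pvK, ← hcs, hdrop, List.findIdx_cons]
  have hcecs : cs ≤ ce := by omega
  rw [find_label_span_py, find_label_span_py_alt, hA1, hA2, hB]
  simp only
  by_cases hg : (pvOg offset cs).1 > end_char ∨ (pvOg offset ce).2 < start_char
  · rw [if_pos hg, if_pos hg]
  · rw [if_neg hg, if_neg hg]
    rw [foldl_bStep_split]
    rw [← aLoop3_eq offset ce start_char (ce + 1 - cs) cs (by omega)]
    rw [← aLoop4_eq offset cs end_char (ce + 1 - cs) (ce : Int) (by omega)]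

-- ===== VERDICT (by name: the statement is the Claim_ definition above) =====
theorem find_label_span_py_spec : Claim_equal_find_label_span_py := by
  intro offset sequence_ids start_char end_char _ hpre
  unfold Spec_find_label_span_py
  exact find_label_span_main offset sequence_ids start_char end_char hpre.1

@[simp] theorem find_label_span_py_raises : Claim_raises_find_label_span_py := by
  unfold Claim_raises_find_label_span_py
  constructor
  · intro offset sequence_ids start_char end_char _ hr hp
    unfold Raises_find_label_span_py at hr
    unfold Pre_find_label_span_py at hp
    omega
  · exact ⟨by decide, by decide, by decide⟩
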